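-- pv_equiv track=rewrite | github.com/VladislavSmekhnov/grap-cov | Greedy.py | solve
-- ===== SOURCE A (Python) =====
-- def get_max_deg(vertex):
--     I = 0
--     max_deg = 0
--     for i in range(len(vertex)):
--         if vertex[i] > max_deg:
--             max_deg = vertex[i]
--             I = i
--     return I
--
-- def count_vertex_degs(graph):
--     n = len(graph)
--     vertex_deg = [0] * n
--
--     for i in range(n):
--         for j in range(n):
--             if graph[i][j] == 1:
--                 vertex_deg[i] += 1
--                 if i == j:
--                     vertex_deg[i] += 1
--     return vertex_deg
--
-- def is_empty(vertex):
--     for i in range(len(vertex)):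
--         if vertex[i] != 0:
--             return False
--     return True
--
-- def solve(graph):
--     result = []
--
--     n = len(graph)
--
--     vertex_deg = count_vertex_degs(graph)
--
--     while len(result) < n and not is_empty(vertex_deg):
--         vertex = get_max_deg(vertex_deg)
--         result.append(vertex)
--
--         for i in range(n):
--             graph[vertex][i] = graph[i][vertex] = 0
--
--         vertex_deg = count_vertex_degs(graph)
--
--     return result
-- ===== SOURCE B (Python) =====
-- # Degrees are computed once (C-speed list.count per row) and updated incrementally
-- # when a vertex is picked, instead of A's full matrix re-zeroing and re-count each
-- # round. Return-value equivalence only: A zeroes the caller's matrix in place; B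
-- # does not mutate its argument.
-- def solve(graph):
--     n = len(graph)
--     deg = [row[:n].count(1) for row in graph]
--     for i in range(n):
--         if graph[i][i] == 1:
--             deg[i] += 1
--     removed = [False] * n
--     result = []
--     while True:
--         m = max(deg, default=0)
--         if m <= 0:
--             break
--         v = deg.index(m)
--         result.append(v)
--         removed[v] = True
--         deg[v] = 0
--         for i in range(n):
--             if not removed[i] and graph[i][v] == 1:
--                 deg[i] -= 1
--     return result
-- ===== Notes on version B (the rewrite author's own statement) =====
-- stated objective: faster
-- what changed: B computes the degree array once (using C-implemented list.count per row) and, when a vertex is picked, decrements the still-present neighbours' degrees in one O(n) pass, instead of A's re-zeroing of the matrix and full O(n^2) Python-loop degree recount after every pick (A also mutates the caller's matrix in place; B leaves it untouched, return values agree).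
import Mathlib
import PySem

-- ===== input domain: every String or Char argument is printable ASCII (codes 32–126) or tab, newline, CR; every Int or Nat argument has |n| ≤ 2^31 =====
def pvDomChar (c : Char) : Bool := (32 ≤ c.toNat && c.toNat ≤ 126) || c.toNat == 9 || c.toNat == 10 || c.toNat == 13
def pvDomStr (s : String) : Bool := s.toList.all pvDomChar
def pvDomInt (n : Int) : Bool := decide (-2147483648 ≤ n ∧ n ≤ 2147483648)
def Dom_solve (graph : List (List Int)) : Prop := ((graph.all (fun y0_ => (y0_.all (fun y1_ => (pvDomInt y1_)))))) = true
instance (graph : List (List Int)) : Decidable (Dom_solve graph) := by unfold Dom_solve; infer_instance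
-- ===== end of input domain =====

-- B replaces A's re-zeroing of the matrix and full degree recount after every pick by a
-- one-pass incremental decrement of the neighbours' degrees (asymptotically faster);
-- return values agree (A also zeroes the caller's matrix in place, B does not mutate it).


-- shared indexing helper: graph[i][j] (in range under Pre_solve, where both Pythons read it)
def pvEntry (g : List (List Int)) (i j : Nat) : Int := (g.getD i []).getD j 0

-- ===== PORT A =====
-- get_max_deg: running max with strict '>', first maximal index, state (I, max_deg) = (0, 0)
def get_max_deg (vertex : List Int) : Nat :=
  ((vertex.zipIdx).foldl (fun s xi => if xi.1 > s.2 then (xi.2, xi.1) else s)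
    ((0 : Nat), (0 : Int))).1

-- count_vertex_degs: vertex_deg[i] += 1 for each graph[i][j] == 1, once more on the diagonal
def count_vertex_degs (g : List (List Int)) : List Int :=
  (List.range g.length).map (fun i =>
    (List.range g.length).foldl (fun d j =>
      if pvEntry g i j = 1 then (if i = j then d + 1 + 1 else d + 1) else d) (0 : Int))

def is_empty_deg (v : List Int) : Bool := v.all (fun x => x == 0)

-- for i in range(n): graph[vertex][i] = graph[i][vertex] = 0   (left-to-right, as Python)
def zero_row_col (g : List (List Int)) (v : Nat) : List (List Int) :=
  (List.range g.length).foldl (fun g i =>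
    let g1 := g.set v ((g.getD v []).set i 0)
    g1.set i ((g1.getD i []).set v 0)) g

-- while len(result) < n and not is_empty(vertex_deg): fuel = n - len(result)
def solveLoop (g : List (List Int)) (result : List Int) : Nat → List Int
  | 0 => result
  | fuel + 1 =>
    let deg := count_vertex_degs g
    if is_empty_deg deg then result
    else
      let v := get_max_deg deg
      solveLoop (zero_row_col g v) (result ++ [(v : Int)]) fuel

def solve (graph : List (List Int)) : List Int := solveLoop graph [] graph.length

-- ===== PORT B =====
-- deg = [row[:n].count(1) for row in graph]; then the diagonal pass
def init_degs (g : List (List Int)) : List Int :=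
  let deg := g.map (fun row =>
    ((PySem.List.count (PySem.List.slice row none (some (g.length : Int))) 1 : Nat) : Int))
  (List.range g.length).foldl
    (fun d i => if pvEntry g i i = 1 then d.set i (d.getD i 0 + 1) else d) deg

-- while True: m = max(deg, default=0); stop when m <= 0; fuel n covers the ≤ n iterations
def solveAltLoop (g : List (List Int)) (deg : List Int) (removed : List Bool)
    (result : List Int) : Nat → List Int
  | 0 => result
  | fuel + 1 =>
    let m := PySem.List.maxD deg (fun x => x) 0
    if m ≤ 0 then result
    else
      let v := (PySem.List.index? deg m).getD 0
      let removed' := removed.set v true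
      let deg' := (List.range g.length).foldl
        (fun d i => if ¬ removed'.getD i false ∧ pvEntry g i v = 1
                    then d.set i (d.getD i 0 - 1) else d)
        (deg.set v 0)
      solveAltLoop g deg' removed' (result ++ [(v : Int)]) fuel

def solve_alt (graph : List (List Int)) : List Int :=
  solveAltLoop graph (init_degs graph) (List.replicate graph.length false) [] graph.length

-- ===== PRECONDITION & SPEC =====
-- A raises IndexError (in count_vertex_degs / the zeroing loop) iff some row is shorter
-- than the number of rows; Pre_ admits exactly the inputs on which A returns.
def Pre_solve (graph : List (List Int)) : Prop :=
  ∀ row ∈ graph, graph.length ≤ row.length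
instance (graph : List (List Int)) : Decidable (Pre_solve graph) := by
  unfold Pre_solve; infer_instance

def pvWitness_solve : List (List Int) := [[1, 1], [1, 0]]

def Spec_solve (graph : List (List Int)) (out : List Int) : Prop := out = solve_alt graph
instance (graph : List (List Int)) (out : List Int) : Decidable (Spec_solve graph out) := by
  unfold Spec_solve; infer_instance

-- ===== CLAIM (what is proved, stated in full; the proofs are below) =====
def Claim_equal_solve : Prop :=
  ∀ (graph : List (List Int)), Dom_solve graph → Pre_solve graph →
    Spec_solve graph (solve graph)

-- ===== LEMMAS AND PROOFS =====

-- getD after set, in closed form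
theorem getD_set' {α : Type} (l : List α) (i j : Nat) (a d : α) :
    (l.set i a).getD j d = if i = j ∧ i < l.length then a else l.getD j d := by
  simp only [List.getD_eq_getElem?_getD, List.getElem?_set]
  by_cases hij : i = j
  · subst hij; by_cases hl : i < l.length <;> simp [hl]
  · simp [hij]

-- a fold over range k that conditionally updates position i leaves the length unchanged
theorem foldl_set_length {α : Type} (d : α) (c : Nat → Prop) [DecidablePred c] (f : α → α) :
    ∀ (k : Nat) (xs : List α),
      ((List.range k).foldl (fun l i => if c i then l.set i (f (l.getD i d)) else l) xs).length
        = xs.length := by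
  intro k xs
  induction k with
  | zero => simp
  | succ k ih => simp only [List.range_succ, List.foldl_append, List.foldl_cons, List.foldl_nil]
                 split
                 · rw [List.length_set]; exact ih
                 · exact ih

-- … and its effect at position j: updated exactly when j < k and c j holds
theorem foldl_set_getD {α : Type} (d : α) (c : Nat → Prop) [DecidablePred c] (f : α → α) :
    ∀ (k : Nat) (xs : List α) (j : Nat), j < xs.length →
      ((List.range k).foldl (fun l i => if c i then l.set i (f (l.getD i d)) else l) xs).getD j d
        = if j < k ∧ c j then f (xs.getD j d) else xs.getD j d := by
  intro k
  induction k with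
  | zero => intro xs j hj; simp
  | succ k ih =>
    intro xs j hj
    simp only [List.range_succ, List.foldl_append, List.foldl_cons, List.foldl_nil]
    set Y := (List.range k).foldl (fun l i => if c i then l.set i (f (l.getD i d)) else l) xs
      with hY
    have hlen : Y.length = xs.length := foldl_set_length d c f k xs
    have hYj : Y.getD j d = if j < k ∧ c j then f (xs.getD j d) else xs.getD j d := ih xs j hj
    by_cases hck : c k
    · rw [if_pos hck, getD_set']
      by_cases hjk : k = j
      · subst hjk
        have hYk : Y.getD k d = xs.getD k d := by rw [hYj]; simp
        rw [if_pos ⟨rfl, hlen ▸ hj⟩, hYk, if_pos ⟨by omega, hck⟩]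
      · rw [if_neg (fun h => hjk h.1), hYj]
        have hiff : (j < k ∧ c j) ↔ (j < k + 1 ∧ c j) := by
          constructor
          · rintro ⟨h1, h2⟩; exact ⟨by omega, h2⟩
          · rintro ⟨h1, h2⟩
            refine ⟨?_, h2⟩
            rcases Nat.lt_succ_iff_lt_or_eq.mp h1 with h | h
            · exact h
            · exact absurd h (Ne.symm hjk)
        rw [if_congr hiff rfl rfl]
    · rw [if_neg hck, hYj]
      have hiff : (j < k ∧ c j) ↔ (j < k + 1 ∧ c j) := by
        constructor
        · rintro ⟨h1, h2⟩; exact ⟨by omega, h2⟩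
        · rintro ⟨h1, h2⟩
          refine ⟨?_, h2⟩
          rcases Nat.lt_succ_iff_lt_or_eq.mp h1 with h | h
          · exact h
          · exact absurd (h ▸ h2) hck
      rw [if_congr hiff rfl rfl]

-- the weight A adds for cell (i, j)
def wA (g : List (List Int)) (i j : Nat) : Int :=
  if pvEntry g i j = 1 then (if i = j then 2 else 1) else 0

theorem cvd_length (g : List (List Int)) : (count_vertex_degs g).length = g.length := by
  simp [count_vertex_degs]

theorem cvd_getD (g : List (List Int)) (i : Nat) (hi : i < g.length) :
    (count_vertex_degs g).getD i 0 = ((List.range g.length).map (wA g i)).sum := by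
  unfold count_vertex_degs
  rw [List.getD_eq_getElem?_getD, List.getElem?_map, List.getElem?_range hi]
  simp only [Option.map_some, Option.getD_some]
  rw [PySem.List.foldl_congr_mem _ _ (fun d j => d + wA g i j) 0
    (by intro acc j _; unfold wA; split_ifs <;> simp_all; ring)]
  rw [PySem.List.foldl_add]
  ring

theorem wA_nonneg (g : List (List Int)) (i j : Nat) : 0 ≤ wA g i j := by
  unfold wA; split_ifs <;> norm_num

theorem cvd_getD_nonneg (g : List (List Int)) (i : Nat) :
    0 ≤ (count_vertex_degs g).getD i 0 := by
  by_cases hi : i < g.length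
  · rw [cvd_getD g i hi]
    apply List.sum_nonneg
    intro x hx
    obtain ⟨j, _, rfl⟩ := List.mem_map.mp hx
    exact wA_nonneg g i j
  · rw [List.getD_eq_getElem?_getD, List.getElem?_eq_none (by rw [cvd_length]; omega)]
    simp

theorem cvd_mem_nonneg (g : List (List Int)) : ∀ x ∈ count_vertex_degs g, 0 ≤ x := by
  intro x hx
  obtain ⟨i, hi, rfl⟩ := List.mem_iff_getElem.mp hx
  rw [show (count_vertex_degs g)[i] = (count_vertex_degs g).getD i 0 from
    (List.getD_eq_getElem _ _ hi).symm]
  exact cvd_getD_nonneg g i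

-- only position i contributes: the sum collapses to f i
theorem sum_range_single (n i : Nat) (hi : i < n) (f : Nat → Int)
    (h0 : ∀ j, j < n → j ≠ i → f j = 0) : ((List.range n).map f).sum = f i := by
  induction n with
  | zero => omega
  | succ n ih =>
    rw [List.range_succ, List.map_append, List.sum_append]
    by_cases hin : i = n
    · subst hin
      have hz : ((List.range i).map f).sum = 0 := by
        apply List.sum_eq_zero
        intro x hx
        obtain ⟨j, hj, rfl⟩ := List.mem_map.mp hx
        exact h0 j (by simp at hj; omega) (by simp at hj; omega)
      simp [hz]
    · have hi' : i < n := by omega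
      rw [ih hi' (fun j hj hne => h0 j (by omega) hne)]
      have hz : f n = 0 := h0 n (by omega) (fun h => hin h.symm)
      simp [hz]

-- A's running-max fold: second component is the max (floored at 0), first is its first index
theorem fold_argmax (deg : List Int) :
    ((deg.zipIdx.foldl (fun s xi => if xi.1 > s.2 then (xi.2, xi.1) else s)
        ((0 : Nat), (0 : Int))).2 = deg.foldl max 0)
    ∧ (0 < deg.foldl max 0 →
        PySem.List.index? deg (deg.foldl max 0)
          = some (deg.zipIdx.foldl (fun s xi => if xi.1 > s.2 then (xi.2, xi.1) else s)
              ((0 : Nat), (0 : Int))).1) := by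
  induction deg using List.reverseRecOn with
  | nil => simp
  | append_singleton l x ih =>
    obtain ⟨ihM, ihI⟩ := ih
    have hzip : (l ++ [x]).zipIdx = l.zipIdx ++ [(x, l.length)] := by
      simp [List.zipIdx_append]
    rw [hzip, List.foldl_append, List.foldl_append]
    simp only [List.foldl_cons, List.foldl_nil]
    by_cases hx : x > (l.zipIdx.foldl (fun s xi => if xi.1 > s.2 then (xi.2, xi.1) else s)
        ((0 : Nat), (0 : Int))).2
    · rw [if_pos hx]
      have hmax : max (l.foldl max 0) x = x := by
        rw [ihM] at hx; exact max_eq_right (le_of_lt hx)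
      constructor
      · simp [hmax]
      · intro _
        have hnotmem : x ∉ l := by
          intro hmem
          have := (PySem.List.le_foldl_max l 0).2 x hmem
          rw [ihM] at hx; omega
        simp only [hmax]
        exact PySem.List.index?_append_singleton_self l x hnotmem
    · rw [if_neg hx]
      have hle : x ≤ l.foldl max 0 := by rw [ihM] at hx; omega
      have hmax : max (l.foldl max 0) x = l.foldl max 0 := max_eq_left hle
      refine ⟨by simp [hmax, ihM], ?_⟩
      intro hpos
      simp only [hmax] at hpos ⊢
      have hmem : l.foldl max 0 ∈ l := by
        rcases PySem.List.foldl_max_mem l 0 with h | h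
        · omega
        · exact h
      rw [PySem.List.index?_append_of_mem [x] hmem]
      exact ihI hpos

theorem maxD_eq_foldl (deg : List Int) (h : ∀ x ∈ deg, 0 ≤ x) :
    PySem.List.maxD deg (fun x => x) 0 = deg.foldl max 0 := by
  cases deg with
  | nil => simp [PySem.List.maxD, PySem.List.max?]
  | cons d0 t =>
    simp only [PySem.List.maxD, PySem.List.max?_id_cons, Option.getD_some, List.foldl_cons]
    have : max 0 d0 = d0 := max_eq_right (h d0 List.mem_cons_self)
    rw [this]

-- Python's is_empty(deg) for a nonnegative deg is "max(deg, default=0) <= 0"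
theorem guard_iff (deg : List Int) (h : ∀ x ∈ deg, 0 ≤ x) :
    is_empty_deg deg = true ↔ deg.foldl max 0 ≤ 0 := by
  unfold is_empty_deg
  rw [List.all_eq_true]
  constructor
  · intro hall
    rcases PySem.List.foldl_max_mem deg 0 with h0 | hmem
    · omega
    · have := hall _ hmem
      simp only [beq_iff_eq] at this
      omega
  · intro hle x hx
    have h1 := (PySem.List.le_foldl_max deg 0).2 x hx
    have h2 := h x hx
    simp only [beq_iff_eq]
    omega

-- zero_row_col characterised row by row
theorem zrc_partial (g : List (List Int)) (v : Nat) (hv : v < g.length) :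
    ∀ k, k ≤ g.length →
      ((List.range k).foldl (fun g i =>
          let g1 := g.set v ((g.getD v []).set i 0)
          g1.set i ((g1.getD i []).set v 0)) g).length = g.length
      ∧ (∀ i, i ≠ v →
          ((List.range k).foldl (fun g i =>
            let g1 := g.set v ((g.getD v []).set i 0)
            g1.set i ((g1.getD i []).set v 0)) g).getD i []
          = if i < k then (g.getD i []).set v 0 else g.getD i [])
      ∧ ((List.range k).foldl (fun g i =>
          let g1 := g.set v ((g.getD v []).set i 0)
          g1.set i ((g1.getD i []).set v 0)) g).getD v []
        = (List.range k).foldl (fun r i => r.set i 0) (g.getD v []) := by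
  intro k
  induction k with
  | zero => exact fun _ => ⟨rfl, fun i _ => by simp, rfl⟩
  | succ k ih =>
    intro hk1
    obtain ⟨ihL, ihR, ihV⟩ := ih (by omega)
    simp only [List.range_succ, List.foldl_append, List.foldl_cons, List.foldl_nil] at *
    set G := List.foldl (fun g i =>
        let g1 := g.set v ((g.getD v []).set i 0)
        g1.set i ((g1.getD i []).set v 0)) g (List.range k) with hG
    have hkl : k < g.length := by omega
    have hvG : v < G.length := by rw [ihL]; exact hv
    -- one step: z = G with row v zeroed at k, then row k gets column v zeroed
    have hz_getD : ∀ i, (G.set v ((G.getD v []).set k 0)).getD i []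
        = if v = i then (G.getD v []).set k 0 else G.getD i [] := by
      intro i
      rw [getD_set']
      by_cases hvi : v = i
      · rw [if_pos ⟨hvi, hvG⟩, if_pos hvi]
      · rw [if_neg (fun h => hvi h.1), if_neg hvi]
    have hzlen : (G.set v ((G.getD v []).set k 0)).length = g.length := by
      rw [List.length_set, ihL]
    refine ⟨?_, ?_, ?_⟩
    · simp only [List.length_set]
      exact ihL
    · intro i hiv
      rw [getD_set']
      by_cases hik : k = i
      · subst hik
        rw [if_pos ⟨rfl, by rw [hzlen]; exact hkl⟩, hz_getD,
          if_neg (fun h => hiv h.symm), ihR k hiv, if_neg (lt_irrefl k),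
          if_pos (Nat.lt_succ_self k)]
      · rw [if_neg (fun h => hik h.1), hz_getD, if_neg (fun h => hiv h.symm), ihR i hiv]
        have hiff : i < k ↔ i < k + 1 := ⟨fun h => by omega, fun h => by omega⟩
        rw [if_congr hiff rfl rfl]
    · rw [getD_set']
      by_cases hkv : k = v
      · subst hkv
        rw [if_pos ⟨rfl, by rw [hzlen]; omega⟩, hz_getD, if_pos rfl, List.set_set, ihV]
      · rw [if_neg (fun h => hkv h.1), hz_getD, if_pos rfl, ihV]

theorem zrc_rows (g : List (List Int)) (v : Nat) (hv : v < g.length) :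
    (zero_row_col g v).length = g.length
    ∧ (∀ i, i ≠ v → (zero_row_col g v).getD i []
        = if i < g.length then (g.getD i []).set v 0 else g.getD i [])
    ∧ (zero_row_col g v).getD v []
        = (List.range g.length).foldl (fun r i => r.set i 0) (g.getD v []) := by
  exact zrc_partial g v hv g.length le_rfl

-- the row-v zeroing fold, pointwise
theorem rowzero_getD (r : List Int) (k j : Nat) (hj : j < r.length) :
    ((List.range k).foldl (fun r i => r.set i 0) r).getD j 0
      = if j < k then 0 else r.getD j 0 := by
  have h := foldl_set_getD (0 : Int) (fun _ => True) (fun _ => (0 : Int)) k r j hj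
  simpa using h

theorem rowzero_length (r : List Int) (k : Nat) :
    ((List.range k).foldl (fun r i => r.set i 0) r).length = r.length := by
  have h := foldl_set_length (0 : Int) (fun _ => True) (fun _ => (0 : Int)) k r
  simpa using h

theorem zrc_entry (g : List (List Int)) (v : Nat) (hv : v < g.length)
    (hrow : ∀ i, i < g.length → g.length ≤ (g.getD i []).length) :
    ∀ i j, i < g.length → j < g.length →
      pvEntry (zero_row_col g v) i j = if i = v ∨ j = v then 0 else pvEntry g i j := by
  obtain ⟨hL, hR, hV⟩ := zrc_rows g v hv
  intro i j hi hj
  unfold pvEntry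
  by_cases hiv : i = v
  · subst hiv
    rw [hV, rowzero_getD _ _ _ (lt_of_lt_of_le hj (hrow i hi))]
    simp [hj]
  · rw [hR i hiv, if_pos hi, getD_set']
    by_cases hjv : j = v
    · subst hjv
      rw [if_pos ⟨rfl, lt_of_lt_of_le hj (hrow i hi)⟩, if_pos (Or.inr rfl)]
    · rw [if_neg (fun h => hjv h.1.symm), if_neg (by tauto)]

theorem zrc_rowlen (g : List (List Int)) (v : Nat) (hv : v < g.length) :
    ∀ i, i < g.length → ((zero_row_col g v).getD i []).length = (g.getD i []).length := by
  obtain ⟨hL, hR, hV⟩ := zrc_rows g v hv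
  intro i hi
  by_cases hiv : i = v
  · subst hiv; rw [hV, rowzero_length]
  · rw [hR i hiv, if_pos hi, List.length_set]

-- the loop invariant tying A's zeroed matrix to B's (deg, removed) state
def LoopInv (g0 g' : List (List Int)) (deg : List Int) (removed : List Bool) : Prop :=
  g'.length = g0.length
  ∧ removed.length = g0.length
  ∧ (∀ i, i < g0.length → g0.length ≤ ((g'.getD i []) : List Int).length)
  ∧ (∀ i j, i < g0.length → j < g0.length →
      pvEntry g' i j
        = if removed.getD i false ∨ removed.getD j false then (0 : Int) else pvEntry g0 i j)
  ∧ deg = count_vertex_degs g'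

-- list.count over the first n entries is the 0/1 indicator sum A accumulates
theorem count_take_eq_sum (row : List Int) : ∀ n : Nat, n ≤ row.length →
    ((PySem.List.count (row.take n) 1 : Nat) : Int)
      = ((List.range n).map (fun j => if row.getD j 0 = 1 then (1 : Int) else 0)).sum := by
  intro n
  induction n with
  | zero => intro _; simp [PySem.List.count_eq]
  | succ n ih =>
    intro hn
    have hnl : n < row.length := by omega
    have htake : row.take (n + 1) = row.take n ++ [row[n]] := by
      rw [List.take_add_one]
      simp [List.getElem?_eq_getElem hnl]
    rw [htake, List.range_succ, List.map_append, List.sum_append, ← ih (by omega)]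
    simp only [PySem.List.count_eq, List.count_append, List.count_cons, List.count_nil]
    push_cast
    simp only [List.map_cons, List.map_nil, List.sum_cons, List.sum_nil]
    rw [List.getD_eq_getElem _ _ hnl]
    by_cases h1 : row[n] = 1 <;> simp [h1]

theorem init_eq_cvd (g : List (List Int))
    (hrow : ∀ i, i < g.length → g.length ≤ (g.getD i []).length) :
    init_degs g = count_vertex_degs g := by
  unfold init_degs
  set base := g.map (fun row =>
    ((PySem.List.count (PySem.List.slice row none (some (g.length : Int))) 1 : Nat) : Int))
    with hbase
  have hbaseLen : base.length = g.length := by simp [hbase]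
  have hbaseGetD : ∀ i, i < g.length → base.getD i 0
      = ((List.range g.length).map (fun j => if pvEntry g i j = 1 then (1 : Int) else 0)).sum := by
    intro i hi
    rw [hbase, List.getD_eq_getElem?_getD, List.getElem?_map, List.getElem?_eq_getElem hi]
    simp only [Option.map_some, Option.getD_some]
    rw [PySem.List.slice_to_natCast]
    have hlenrow : g.length ≤ g[i].length := by
      rw [← List.getD_eq_getElem g [] hi]
      exact hrow i hi
    rw [count_take_eq_sum g[i] g.length hlenrow]
    unfold pvEntry
    rw [List.getD_eq_getElem g [] hi]
  have hsetLen := foldl_set_length (0 : Int) (fun i => pvEntry g i i = 1)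
    (fun x => x + 1) g.length base
  apply List.ext_getElem
  · rw [hsetLen, hbaseLen, cvd_length]
  · intro i h1 h2
    have hi : i < g.length := by rw [cvd_length] at h2; exact h2
    rw [← List.getD_eq_getElem _ (0 : Int) h1, ← List.getD_eq_getElem _ (0 : Int) h2]
    rw [foldl_set_getD (0 : Int) (fun i => pvEntry g i i = 1) (fun x => x + 1) g.length base i
      (by rw [hbaseLen]; exact hi)]
    rw [cvd_getD g i hi, hbaseGetD i hi]
    have hsplit : ((List.range g.length).map (wA g i)).sum
        = ((List.range g.length).map (fun j => if pvEntry g i j = 1 then (1 : Int) else 0)).sum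
          + (if pvEntry g i i = 1 then (1 : Int) else 0) := by
      have hpt : (List.range g.length).map (wA g i)
          = (List.range g.length).map (fun j =>
              (if pvEntry g i j = 1 then (1 : Int) else 0)
              + (if j = i ∧ pvEntry g i j = 1 then (1 : Int) else 0)) := by
        apply List.map_congr_left
        intro j hj
        unfold wA
        by_cases h1 : pvEntry g i j = 1 <;> by_cases h2 : i = j <;> simp_all
        omega
      rw [hpt, PySem.List.sum_map_add_int]
      congr 1
      rw [sum_range_single g.length i hi _ (fun j hj hne => by simp [hne])]
      simp
    rw [hsplit]
    split_ifs with hd <;> simp_all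

theorem loop_eq (g0 : List (List Int)) :
    ∀ (fuel : Nat) (g' : List (List Int)) (deg : List Int) (removed : List Bool)
      (result : List Int), LoopInv g0 g' deg removed →
      solveLoop g' result fuel = solveAltLoop g0 deg removed result fuel := by
  intro fuel
  induction fuel with
  | zero => intro g' deg removed result _; rfl
  | succ fuel ih =>
    intro g' deg removed result hInv
    obtain ⟨hlen', hlenR, hrow, hE, hdeg⟩ := hInv
    have hnn : ∀ x ∈ deg, 0 ≤ x := by rw [hdeg]; exact cvd_mem_nonneg g'
    have hdegLen : deg.length = g0.length := by rw [hdeg, cvd_length, hlen']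
    simp only [solveLoop, solveAltLoop]
    rw [← hdeg, maxD_eq_foldl deg hnn]
    by_cases hstop : deg.foldl max 0 ≤ 0
    · rw [if_pos ((guard_iff deg hnn).mpr hstop), if_pos hstop]
    · have hM : 0 < deg.foldl max 0 := by omega
      rw [if_neg (fun h => hstop ((guard_iff deg hnn).mp h)), if_neg hstop]
      have hidxv : PySem.List.index? deg (deg.foldl max 0) = some (get_max_deg deg) :=
        (fold_argmax deg).2 hM
      rw [hidxv]
      simp only [Option.getD_some]
      set v := get_max_deg deg with hvdef
      obtain ⟨hvlt, hdv, _⟩ := PySem.List.getElem_of_index?_eq_some hidxv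
      have hvn : v < g0.length := by rw [← hdegLen]; exact hvlt
      have hvg' : v < g'.length := by rw [hlen']; exact hvn
      have hrow' : ∀ i, i < g'.length → g'.length ≤ (g'.getD i []).length := by
        intro i hi; rw [hlen'] at hi ⊢; exact hrow i hi
      have hnotrem : removed.getD v false = false := by
        by_contra hr
        have hr' : removed.getD v false = true := by
          cases hb : removed.getD v false
          · exact absurd hb hr
          · rfl
        have hzero : ∀ j, j < g0.length → pvEntry g' v j = 0 := fun j hj => by
          rw [hE v j hvn hj, if_pos (Or.inl hr')]
        have hz : (count_vertex_degs g').getD v 0 = 0 := by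
          rw [cvd_getD g' v hvg']
          apply List.sum_eq_zero
          intro x hx
          obtain ⟨j, hj, rfl⟩ := List.mem_map.mp hx
          have hjn : j < g0.length := by rw [← hlen']; exact List.mem_range.mp hj
          unfold wA
          rw [hzero j hjn]
          norm_num
        rw [← hdeg, List.getD_eq_getElem deg 0 hvlt, hdv] at hz
        omega
      have hremGetD : ∀ i, i < g0.length →
          (removed.set v true).getD i false = if v = i then true else removed.getD i false := by
        intro i hi
        rw [getD_set']
        by_cases h : v = i
        · rw [if_pos ⟨h, by rw [hlenR]; exact hvn⟩, if_pos h]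
        · rw [if_neg (fun hh => h hh.1), if_neg h]
      have hEntry'' := zrc_entry g' v hvg' hrow'
      have hzl : (zero_row_col g' v).length = g'.length := (zrc_rows g' v hvg').1
      have hlen'' : (zero_row_col g' v).length = g0.length := by rw [hzl, hlen']
      have hrv' : (removed.set v true).getD v false = true := by rw [hremGetD v hvn, if_pos rfl]
      -- the incremental decrement pass recomputes exactly A's fresh degree count
      have hdeg'' : (List.range g0.length).foldl
          (fun d i => if ¬ (removed.set v true).getD i false ∧ pvEntry g0 i v = 1
                      then d.set i (d.getD i 0 - 1) else d) (deg.set v 0)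
          = count_vertex_degs (zero_row_col g' v) := by
        apply List.ext_getElem
        · rw [foldl_set_length (0 : Int)
            (fun i => ¬ (removed.set v true).getD i false ∧ pvEntry g0 i v = 1) (fun x => x - 1)
            g0.length (deg.set v 0), List.length_set, hdegLen, cvd_length, hlen'']
        · intro i h1 h2
          have hi : i < g0.length := by rw [cvd_length, hlen''] at h2; exact h2
          have hi' : i < g'.length := by rw [hlen']; exact hi
          rw [← List.getD_eq_getElem _ (0 : Int) h1, ← List.getD_eq_getElem _ (0 : Int) h2]
          rw [foldl_set_getD (0 : Int)
            (fun i => ¬ (removed.set v true).getD i false ∧ pvEntry g0 i v = 1) (fun x => x - 1)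
            g0.length (deg.set v 0) i (by rw [List.length_set, hdegLen]; exact hi)]
          have hgiv : i < (zero_row_col g' v).length := by rw [hlen'']; exact hi
          rw [cvd_getD (zero_row_col g' v) i hgiv, hlen'']
          by_cases hiv : i = v
          · rw [if_neg (show ¬(i < g0.length ∧
                  ¬(removed.set v true).getD i false = true ∧ pvEntry g0 i v = 1)
                from fun h => h.2.1 (by rw [hiv]; exact hrv')),
              getD_set' deg v i (0 : Int) (0 : Int), if_pos ⟨hiv.symm, hvlt⟩]
            symm
            apply List.sum_eq_zero
            intro x hx
            obtain ⟨j, hj, rfl⟩ := List.mem_map.mp hx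
            have hjn : j < g0.length := List.mem_range.mp hj
            have hj' : j < g'.length := by rw [hlen']; exact hjn
            unfold wA
            rw [hEntry'' i j hi' hj', if_pos (Or.inl hiv)]
            norm_num
          · rw [getD_set' deg v i (0 : Int) (0 : Int),
              if_neg (show ¬(v = i ∧ v < deg.length) from fun h => hiv h.1.symm)]
            have hsum : ((List.range g0.length).map (wA (zero_row_col g' v) i)).sum
                = ((List.range g0.length).map (wA g' i)).sum - wA g' i v := by
              have hpt : (List.range g0.length).map (wA (zero_row_col g' v) i)
                  = (List.range g0.length).map (fun j =>
                      wA g' i j + (if j = v then -(wA g' i v) else 0)) := by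
                apply List.map_congr_left
                intro j hjmem
                have hjn : j < g0.length := List.mem_range.mp hjmem
                have hj' : j < g'.length := by rw [hlen']; exact hjn
                by_cases hjv : j = v
                · have hz : pvEntry (zero_row_col g' v) i j = 0 := by
                    rw [hEntry'' i j hi' hj', if_pos (Or.inr hjv)]
                  have h0 : wA (zero_row_col g' v) i j = 0 := by unfold wA; rw [hz]; norm_num
                  rw [h0, if_pos hjv, hjv]
                  ring
                · have hsame : pvEntry (zero_row_col g' v) i j = pvEntry g' i j := by
                    rw [hEntry'' i j hi' hj', if_neg (by tauto)]
                  rw [if_neg hjv]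
                  unfold wA
                  rw [hsame]
                  ring
              rw [hpt, PySem.List.sum_map_add_int,
                sum_range_single g0.length v hvn
                  (fun j => if j = v then -(wA g' i v) else 0)
                  (fun j hj hne => by simp [hne])]
              simp
              omega
            rw [hsum]
            have hdgi : deg.getD i 0 = ((List.range g0.length).map (wA g' i)).sum := by
              rw [hdeg, cvd_getD g' i hi', hlen']
            by_cases hri : removed.getD i false = true
            · have hc : ¬ (¬ (removed.set v true).getD i false ∧ pvEntry g0 i v = 1) := by
                rw [hremGetD i hi, if_neg (fun h => hiv h.symm)]
                intro h
                exact h.1 hri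
              rw [if_neg (fun h => hc h.2)]
              have hz : pvEntry g' i v = 0 := by rw [hE i v hi hvn, if_pos (Or.inl hri)]
              have h0 : wA g' i v = 0 := by unfold wA; rw [hz]; norm_num
              rw [h0, hdgi]
              ring
            · have hri' : removed.getD i false = false := by
                cases hb : removed.getD i false
                · rfl
                · exact absurd hb hri
              have hre : (removed.set v true).getD i false = false := by
                rw [hremGetD i hi, if_neg (fun h => hiv h.symm)]
                exact hri'
              have hePE : pvEntry g' i v = pvEntry g0 i v := by
                rw [hE i v hi hvn, hri', hnotrem]
                simp
              by_cases hc1 : pvEntry g0 i v = 1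
              · rw [if_pos ⟨hi, ⟨by rw [hre]; simp, hc1⟩⟩]
                have h1w : wA g' i v = 1 := by
                  unfold wA
                  rw [hePE, if_pos hc1, if_neg hiv]
                rw [h1w, hdgi]
              · rw [if_neg (fun h => hc1 h.2.2)]
                have h0 : wA g' i v = 0 := by unfold wA; rw [hePE, if_neg hc1]
                rw [h0, hdgi]
                ring
      apply ih
      refine ⟨hlen'', by rw [List.length_set, hlenR], ?_, ?_, hdeg''⟩
      · intro i hi
        have hi' : i < g'.length := by rw [hlen']; exact hi
        rw [zrc_rowlen g' v hvg' i hi']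
        exact hrow i hi
      · intro i j hi hj
        have hi' : i < g'.length := by rw [hlen']; exact hi
        have hj' : j < g'.length := by rw [hlen']; exact hj
        rw [hEntry'' i j hi' hj', hremGetD i hi, hremGetD j hj]
        by_cases hiv : i = v
        · subst hiv; simp
        · by_cases hjv : j = v
          · subst hjv; simp
          · rw [if_neg (show ¬(i = v ∨ j = v) by tauto),
              if_neg (show ¬(v = i) from fun h => hiv h.symm),
              if_neg (show ¬(v = j) from fun h => hjv h.symm),
              hE i j hi hj]

-- ===== VERDICT (by name: the statement is the Claim_ definition above) =====
theorem solve_spec : Claim_equal_solve := by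
  intro graph _hdom hpre
  unfold Spec_solve solve solve_alt
  apply loop_eq
  refine ⟨rfl, by simp, ?_, ?_,
    init_eq_cvd graph (fun i hi => by
      rw [List.getD_eq_getElem _ _ hi]
      exact hpre _ (List.getElem_mem hi))⟩
  · intro i hi
    rw [List.getD_eq_getElem _ _ hi]
    exact hpre _ (List.getElem_mem hi)
  · intro i j hi hj
    rw [List.getD_replicate _ hi, List.getD_replicate _ hj]
    simp
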